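-- pv_equiv track=rewrite | github.com/samAK02/TP-DM-THOR | Problèmes machines identiques.py | ordonnancement_P_C
-- ===== SOURCE A (Python) =====
-- import heapq
--
-- def ordonnancement_P_C(p, m):
--     tasks = sorted([(p[i], i+1) for i in range(len(p))])
--     heap = [(0, k) for k in range(m)]
--     heapq.heapify(heap)
--
--     machines = [[] for _ in range(m)]
--
--     for duration, task_num in tasks:
--         end_time, machine_index = heapq.heappop(heap)
--
--         start = end_time
--         finish = start + duration
--
--         machines[machine_index].append((task_num, start, finish))
--
--         heapq.heappush(heap, (finish, machine_index))
--
--     return machines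
-- ===== SOURCE B (Python) =====
-- def ordonnancement_P_C(p, m):
--     tasks = sorted((d, i + 1) for i, d in enumerate(p))
--     end_times = [0] * m if m > 0 else []
--     machines = [[] for _ in range(m)]
--     for duration, task_num in tasks:
--         k = min(range(len(end_times)), key=lambda j: end_times[j])
--         start = end_times[k]
--         end_times[k] = start + duration
--         machines[k].append((task_num, start, end_times[k]))
--     return machines
-- ===== Notes on version B (the rewrite author's own statement) =====
-- stated objective: simpler
-- what changed: Replaces A's heapq priority queue of (end_time, machine) pairs by a plain per-machine end-time list from which the next machine is picked with a first-minimum scan (min over the machine indices), with the same (end_time, index) tie-breaking.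
-- outside the precondition, e.g. on ordonnancement_P_C([5], 0): A raises IndexError, B raises ValueError
import Mathlib
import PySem

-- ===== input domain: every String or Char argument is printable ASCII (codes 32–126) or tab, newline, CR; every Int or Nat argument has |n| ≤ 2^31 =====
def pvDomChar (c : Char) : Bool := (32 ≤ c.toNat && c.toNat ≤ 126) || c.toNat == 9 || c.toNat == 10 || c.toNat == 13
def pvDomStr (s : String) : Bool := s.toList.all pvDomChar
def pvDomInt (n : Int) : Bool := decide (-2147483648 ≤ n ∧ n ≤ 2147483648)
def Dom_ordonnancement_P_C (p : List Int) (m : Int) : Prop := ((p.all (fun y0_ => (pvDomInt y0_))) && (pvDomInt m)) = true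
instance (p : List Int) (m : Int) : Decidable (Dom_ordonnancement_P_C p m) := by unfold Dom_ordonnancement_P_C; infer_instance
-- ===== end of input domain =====

-- B replaces A's binary heap of (end_time, machine) pairs by a plain list of machine
-- end times selected by an explicit first-minimum scan (simpler; return value only —
-- A never observably mutates its arguments).


-- ===== PORT A =====

-- Python's tuple comparison: lexicographic minimum of two (Int × Int) pairs.
def pyMinPair (x y : Int × Int) : Int × Int :=
  if x.1 < y.1 ∨ (x.1 = y.1 ∧ x.2 ≤ y.2) then x else y

-- heapq.heappop: returns the least pair and the remaining elements; exact for A's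
-- heap because its pairs carry pairwise-distinct machine indices, so the minimum is
-- unique and only the sequence of popped minima is observable in A's result.
def heapPop? (h : List (Int × Int)) : Option ((Int × Int) × List (Int × Int)) :=
  match h with
  | [] => none
  | x :: xs =>
      let mn := xs.foldl pyMinPair x
      some (mn, (x :: xs).erase mn)

def stepA (st : List (Int × Int) × List (List (Int × Int × Int))) (t : Int × Int) :
    List (Int × Int) × List (List (Int × Int × Int)) :=
  match heapPop? st.1 with
  | none => st  -- Python raises IndexError on an empty heap; excluded by Pre_
  | some ((endTime, machineIndex), h') =>
      let start := endTime
      let finish := start + t.1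
      let machines := st.2.set machineIndex.toNat (st.2[machineIndex.toNat]! ++ [(t.2, start, finish)])
      (h' ++ [(finish, machineIndex)], machines)

def ordonnancement_P_C (p : List Int) (m : Int) : List (List (Int × Int × Int)) :=
  -- Python sorts the tuples (p[i], i+1) lexicographically; their second components are
  -- strictly increasing in the comprehension, so the stable sort keyed on the first
  -- component is exact.
  let tasks := PySem.List.sorted ((List.range p.length).map (fun (i : Nat) => (p[i]!, (i : Int) + 1))) (fun t => t.1)
  let heap := (List.range m.toNat).map (fun (k : Nat) => ((0 : Int), (k : Int)))
  let machines := List.replicate m.toNat ([] : List (Int × Int × Int))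
  (tasks.foldl stepA (heap, machines)).2

-- ===== PORT B =====

def argminFrom (e : List Int) (b : Nat) (l : List Nat) : Nat :=
  l.foldl (fun bb j => if e[j]! < e[bb]! then j else bb) b

-- min(range(len(e)), key=lambda j: e[j]): first index attaining the minimum;
-- Python raises ValueError on the empty range, which Pre_ excludes.
def minIndex (e : List Int) : Nat :=
  match List.range e.length with
  | [] => 0
  | i0 :: rest => argminFrom e i0 rest

def stepB (st : List Int × List (List (Int × Int × Int))) (t : Int × Int) :
    List Int × List (List (Int × Int × Int)) :=
  let k := minIndex st.1
  let start := st.1[k]!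
  (st.1.set k (start + t.1), st.2.set k (st.2[k]! ++ [(t.2, start, start + t.1)]))

def ordonnancement_P_C_alt (p : List Int) (m : Int) : List (List (Int × Int × Int)) :=
  -- same exactness note on the sort as in port A
  let tasks := PySem.List.sorted ((PySem.List.enumerate p).map (fun q => (q.2, q.1 + 1))) (fun t => t.1)
  let endTimes := if 0 < m then List.replicate m.toNat (0 : Int) else []
  let machines := List.replicate m.toNat ([] : List (Int × Int × Int))
  (tasks.foldl stepB (endTimes, machines)).2

-- ===== PRECONDITION & SPEC =====
-- A (and B) raise on a nonempty task list with no machine (heappop from an empty heap /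
-- min over an empty range); Pre_ excludes exactly those inputs.
def Pre_ordonnancement_P_C (p : List Int) (m : Int) : Prop := p = [] ∨ 1 ≤ m
instance (p : List Int) (m : Int) : Decidable (Pre_ordonnancement_P_C p m) := by
  unfold Pre_ordonnancement_P_C; infer_instance

def pvWitness_ordonnancement_P_C : List Int × Int := ([3, 1, 2, 2], 2)

def Spec_ordonnancement_P_C (p : List Int) (m : Int) (out : List (List (Int × Int × Int))) : Prop := out = ordonnancement_P_C_alt p m
instance (p : List Int) (m : Int) (out : List (List (Int × Int × Int))) : Decidable (Spec_ordonnancement_P_C p m out) := by unfold Spec_ordonnancement_P_C; infer_instance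

-- ===== CLAIM (what is proved, stated in full; the proofs are below) =====
def Claim_equal_ordonnancement_P_C : Prop := ∀ (p : List Int) (m : Int), Dom_ordonnancement_P_C p m → Pre_ordonnancement_P_C p m → Spec_ordonnancement_P_C p m (ordonnancement_P_C p m)

-- ===== LEMMAS AND PROOFS =====

-- the multiset of pairs A's heap holds, in canonical order: (e[k], off + k) for each k
def canon (e : List Int) (off : Nat) : List (Int × Int) :=
  match e with
  | [] => []
  | a :: t => (a, (off : Int)) :: canon t (off + 1)

-- pyMinPair lifted to an Option accumulator, to fold the minimum of a whole list
def minAcc (o : Option (Int × Int)) (x : Int × Int) : Option (Int × Int) :=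
  some (match o with | none => x | some a => pyMinPair a x)

def minFold (h : List (Int × Int)) : Option (Int × Int) := h.foldl minAcc none

lemma pyMinPair_comm (x y : Int × Int) : pyMinPair x y = pyMinPair y x := by
  obtain ⟨x1, x2⟩ := x; obtain ⟨y1, y2⟩ := y
  simp only [pyMinPair]
  split_ifs <;> simp_all [Prod.ext_iff] <;> omega

lemma pyMinPair_assoc (x y z : Int × Int) :
    pyMinPair (pyMinPair x y) z = pyMinPair x (pyMinPair y z) := by
  obtain ⟨x1, x2⟩ := x; obtain ⟨y1, y2⟩ := y; obtain ⟨z1, z2⟩ := z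
  simp only [pyMinPair]
  split_ifs <;> simp_all [Prod.ext_iff] <;> omega

lemma minAcc_swap (o : Option (Int × Int)) (x y : Int × Int) :
    minAcc (minAcc o x) y = minAcc (minAcc o y) x := by
  cases o with
  | none => simp only [minAcc]; rw [pyMinPair_comm]
  | some a => simp only [minAcc]; rw [pyMinPair_assoc, pyMinPair_assoc, pyMinPair_comm x y]

lemma foldl_minAcc_perm {h1 h2 : List (Int × Int)} (hp : h1.Perm h2) :
    ∀ o, h1.foldl minAcc o = h2.foldl minAcc o := by
  induction hp with
  | nil => intro o; rfl
  | cons x _ ih => intro o; simp only [List.foldl_cons]; exact ih _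
  | swap x y l => intro o; simp only [List.foldl_cons]; rw [minAcc_swap]
  | trans _ _ ih1 ih2 => intro o; exact (ih1 o).trans (ih2 o)

lemma foldl_minAcc_some (l : List (Int × Int)) :
    ∀ a, l.foldl minAcc (some a) = some (l.foldl pyMinPair a) := by
  induction l with
  | nil => intro a; rfl
  | cons x xs ih => intro a; simp only [List.foldl_cons, minAcc]; exact ih _

lemma minFold_cons (x : Int × Int) (xs : List (Int × Int)) :
    minFold (x :: xs) = some (xs.foldl pyMinPair x) := by
  simp only [minFold, List.foldl_cons, minAcc]
  exact foldl_minAcc_some xs x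

lemma canon_length (e : List Int) : ∀ off, (canon e off).length = e.length := by
  induction e with
  | nil => intro off; rfl
  | cons a t ih => intro off; simp [canon, ih]

lemma canon_eq_map (e : List Int) : ∀ off, canon e off =
    (List.range e.length).map (fun (i : Nat) => (e[i]!, ((off : Int) + (i : Int)))) := by
  induction e with
  | nil => intro off; rfl
  | cons a t ih =>
      intro off
      rw [List.length_cons, List.range_succ_eq_map, List.map_cons, List.map_map]
      simp only [canon]
      refine congrArg₂ _ (by simp) ?_
      rw [ih (off + 1)]
      apply List.map_congr_left
      intro i _
      simp only [Function.comp, Nat.succ_eq_add_one, List.getElem!_cons_succ]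
      refine congrArg _ ?_
      push_cast; ring

lemma argminFrom_lt (e : List Int) (n : Nat) :
    ∀ (l : List Nat) (b : Nat), b < n → (∀ j ∈ l, j < n) → argminFrom e b l < n := by
  intro l
  induction l with
  | nil => intro b hb _; exact hb
  | cons j l ih =>
      intro b hb hl
      simp only [argminFrom, List.foldl_cons]
      by_cases h : e[j]! < e[b]! <;> simp only [h, if_pos, ite_false]
      · exact ih j (hl j (by simp)) (fun x hx => hl x (by simp [hx]))
      · exact ih b hb (fun x hx => hl x (by simp [hx]))

lemma minIndex_lt (e : List Int) (he : e ≠ []) : minIndex e < e.length := by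
  unfold minIndex
  cases h : List.range e.length with
  | nil =>
      exfalso
      have : e.length = 0 := by simpa using congrArg List.length h
      exact he (List.length_eq_zero_iff.mp this)
  | cons i0 rest =>
      have hmem : ∀ j ∈ i0 :: rest, j < e.length := by
        intro j hj
        have : j ∈ List.range e.length := h ▸ hj
        simpa using this
      exact argminFrom_lt e e.length rest i0 (hmem i0 (by simp)) (fun x hx => hmem x (by simp [hx]))

lemma fold_min_argmin (e : List Int) :
    ∀ (l : List Nat) (b : Nat), (∀ j ∈ l, b < j) → l.Pairwise (· < ·) →
      l.foldl (fun (acc : Int × Int) (j : Nat) => pyMinPair acc (e[j]!, (j : Int))) (e[b]!, (b : Int)) =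
        (e[argminFrom e b l]!, (argminFrom e b l : Int)) := by
  intro l
  induction l with
  | nil => intro b _ _; rfl
  | cons j l ih =>
      intro b hb hp
      have hbj : b < j := hb j (by simp)
      have hp' := List.pairwise_cons.mp hp
      simp only [List.foldl_cons, argminFrom, List.foldl_cons]
      by_cases h : e[j]! < e[b]!
      · have hstep : pyMinPair (e[b]!, (b : Int)) (e[j]!, (j : Int)) = (e[j]!, (j : Int)) := by
          simp only [pyMinPair]; split_ifs with hc
          · exfalso; rcases hc with hc | ⟨hc, _⟩ <;> omega
          · rfl
        rw [hstep]
        simp only [h, ite_true]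
        exact ih j (fun x hx => hp'.1 x hx) hp'.2
      · have hstep : pyMinPair (e[b]!, (b : Int)) (e[j]!, (j : Int)) = (e[b]!, (b : Int)) := by
          simp only [pyMinPair]; split_ifs with hc
          · rfl
          · exfalso; apply hc
            rcases lt_or_eq_of_le (not_lt.mp h) with h' | h'
            · exact Or.inl h'
            · exact Or.inr ⟨h', by exact_mod_cast le_of_lt hbj⟩
        rw [hstep]
        simp only [h, ite_false]
        exact ih b (fun x hx => lt_trans hbj (hp'.1 x hx)) hp'.2

lemma canon_zero (e : List Int) :
    canon e 0 = (List.range e.length).map (fun (i : Nat) => (e[i]!, (i : Int))) := by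
  rw [canon_eq_map]
  simp

lemma key_min (e : List Int) (he : e ≠ []) :
    minFold (canon e 0) = some (e[minIndex e]!, (minIndex e : Int)) := by
  cases e with
  | nil => exact absurd rfl he
  | cons a t =>
      rw [canon_zero]
      rw [List.length_cons, List.range_succ_eq_map, List.map_cons, List.map_map]
      rw [minFold_cons, List.foldl_map]
      have harg := fold_min_argmin (a :: t) (List.map Nat.succ (List.range t.length)) 0
        (by intro j hj; simp at hj; omega)
        (by
          rw [List.pairwise_map]
          exact List.Pairwise.imp (fun h => Nat.succ_lt_succ h) List.pairwise_lt_range)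
      have hmI : minIndex (a :: t) = argminFrom (a :: t) 0 (List.map Nat.succ (List.range t.length)) := by
        simp only [minIndex, List.length_cons, List.range_succ_eq_map]
      rw [List.foldl_map, Nat.cast_zero] at harg
      rw [hmI, ← harg]
      simp

lemma canon_set_perm (e : List Int) :
    ∀ (off k : Nat) (f : Int), k < e.length →
      (canon (e.set k f) off).Perm
        ((f, ((off : Int) + (k : Int))) :: (canon e off).erase (e[k]!, ((off : Int) + (k : Int)))) := by
  induction e with
  | nil => intro off k f hk; simp at hk
  | cons a t ih =>
      intro off k f hk
      cases k with
      | zero => simp [canon, List.erase_cons_head]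
      | succ k =>
          have hX : ((off : Int) + ((k + 1 : Nat) : Int)) = (((off + 1 : Nat) : Int) + (k : Int)) := by
            push_cast; ring
          have hne : ¬(((a, (off : Int)) : Int × Int) = (t[k]!, ((off : Int) + ((k + 1 : Nat) : Int)))) := by
            intro hcon
            have := congrArg Prod.snd hcon
            simp at this
            omega
          simp only [List.set_cons_succ, canon, List.getElem!_cons_succ]
          rw [List.erase_cons_tail ?hne']
          case hne' =>
            simp only [beq_iff_eq, Prod.mk.injEq, not_and]
            intro _; push_cast; omega
          rw [hX]
          have hk' : k < t.length := by simpa using hk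
          exact ((ih (off + 1) k f hk').cons (a, (off : Int))).trans
            (List.Perm.swap (f, (((off + 1 : Nat) : Int) + (k : Int))) (a, (off : Int)) _)

lemma step_eq (heap : List (Int × Int)) (e : List Int) (mach : List (List (Int × Int × Int)))
    (t : Int × Int) (he : e ≠ []) (hperm : heap.Perm (canon e 0)) :
    ((stepA (heap, mach) t).1.Perm (canon (stepB (e, mach) t).1 0)) ∧
      (stepA (heap, mach) t).2 = (stepB (e, mach) t).2 ∧
      (stepB (e, mach) t).1.length = e.length := by
  have hk : minIndex e < e.length := minIndex_lt e he
  cases hh : heap with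
  | nil =>
      exfalso
      have : (canon e 0).length = 0 := by
        have := hperm.length_eq
        rw [hh] at this
        simpa using this.symm
      rw [canon_length] at this
      exact he (List.length_eq_zero_iff.mp this)
  | cons x xs =>
      have hmn : xs.foldl pyMinPair x = (e[minIndex e]!, (minIndex e : Int)) := by
        have h1 : minFold (x :: xs) = minFold (canon e 0) := by
          rw [← hh]; exact foldl_minAcc_perm hperm none
        rw [minFold_cons, key_min e he] at h1
        exact Option.some.inj h1
      subst hh
      simp only [stepA, heapPop?, hmn, stepB, Int.toNat_natCast]
      refine ⟨?_, by trivial, by simp⟩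
      have hcsp := canon_set_perm e 0 (minIndex e) (e[minIndex e]! + t.1) hk
      simp only [Nat.cast_zero, zero_add] at hcsp
      have her : ((x :: xs).erase (e[minIndex e]!, (minIndex e : Int))).Perm
          ((canon e 0).erase (e[minIndex e]!, (minIndex e : Int))) :=
        hperm.erase _
      exact (List.perm_append_singleton _ _).trans ((her.cons _).trans hcsp.symm)

lemma loop_eq (tasks : List (Int × Int)) :
    ∀ (heap : List (Int × Int)) (e : List Int) (mach : List (List (Int × Int × Int))),
      e ≠ [] → heap.Perm (canon e 0) →
      (tasks.foldl stepA (heap, mach)).2 = (tasks.foldl stepB (e, mach)).2 := by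
  induction tasks with
  | nil => intro heap e mach _ _; rfl
  | cons t ts ih =>
      intro heap e mach he hperm
      obtain ⟨h1, h2, h3⟩ := step_eq heap e mach t he hperm
      simp only [List.foldl_cons]
      have he' : (stepB (e, mach) t).1 ≠ [] := by
        intro hcon
        rw [hcon] at h3
        simp at h3
        exact he (List.length_eq_zero_iff.mp h3.symm)
      have ihh := ih (stepA (heap, mach) t).1 (stepB (e, mach) t).1 (stepB (e, mach) t).2 he' h1
      rw [show stepA (heap, mach) t = ((stepA (heap, mach) t).1, (stepB (e, mach) t).2) from by rw [← h2]]
      exact ihh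

lemma enumerate_map (p : List Int) :
    ∀ (s : Int), (PySem.List.enumerate p s).map (fun q => (q.2, q.1 + 1)) =
      (List.range p.length).map (fun (i : Nat) => (p[i]!, s + (i : Int) + 1)) := by
  induction p with
  | nil => intro s; rfl
  | cons a t ih =>
      intro s
      rw [PySem.List.enumerate_cons, List.map_cons, List.length_cons,
        List.range_succ_eq_map, List.map_cons, List.map_map]
      refine congrArg₂ _ (by simp) ?_
      rw [ih (s + 1)]
      apply List.map_congr_left
      intro i _
      simp only [Function.comp, Nat.succ_eq_add_one, List.getElem!_cons_succ]
      refine congrArg _ ?_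
      push_cast; ring

lemma tasks_eq (p : List Int) :
    (PySem.List.enumerate p).map (fun q => (q.2, q.1 + 1)) =
      (List.range p.length).map (fun (i : Nat) => (p[i]!, (i : Int) + 1)) := by
  rw [enumerate_map p 0]
  apply List.map_congr_left
  intro i _
  simp

-- ===== VERDICT (by name: the statement is the Claim_ definition above) =====
theorem ordonnancement_P_C_spec : Claim_equal_ordonnancement_P_C := by
  intro p m _ hpre
  unfold Spec_ordonnancement_P_C
  by_cases hp : p = []
  · subst hp
    rfl
  · have hm : 1 ≤ m := hpre.resolve_left hp
    unfold ordonnancement_P_C ordonnancement_P_C_alt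
    rw [tasks_eq]
    rw [if_pos (by omega : (0 : Int) < m)]
    apply loop_eq
    · have : 1 ≤ m.toNat := by omega
      intro hcon
      have := congrArg List.length hcon
      simp at this
      omega
    · have : ((List.range m.toNat).map (fun (k : Nat) => ((0 : Int), (k : Int)))) =
        canon (List.replicate m.toNat (0 : Int)) 0 := by
        rw [canon_zero, List.length_replicate]
        apply List.map_congr_left
        intro i hi
        simp only [List.mem_range] at hi
        simp [hi]
      rw [this]
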